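-- pv_equiv track=rewrite | github.com/bjjwwang/AlphaScope | examples/backtest_server/config_converter.py | _adarnn_factorize
-- ===== SOURCE A (Python) =====
-- def _adarnn_factorize(total_features: int) -> tuple[int, int]:
--     """Find (d_feat, len_seq) for ADARNN such that d_feat * len_seq = total_features.
--
--     Prefers len_seq >= 10 for meaningful temporal structure.
--     Falls back to any len_seq >= 2. Primes get len_seq = total_features, d_feat = 1.
--     """
--     # Known optimal factorizations
--     if total_features == 360:
--         return (6, 60)
--     # Find all factor pairs, prefer len_seq in [10..60]
--     best = None
--     for d in range(1, total_features + 1):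
--         if total_features % d == 0:
--             ls = total_features // d
--             if ls < 2:
--                 continue
--             if best is None or (ls <= 60 and ls >= 10 and (best[1] < 10 or d > best[0])):
--                 best = (d, ls)
--             elif best[1] < 10 and ls >= 2:
--                 best = (d, ls)
--     return best if best else (total_features, 1)
-- ===== SOURCE B (Python) =====
-- def _adarnn_factorize(total_features: int) -> tuple[int, int]:
--     """O(1) closed form: the scan over all d reduces to picking the smallest
--     admissible len_seq. For n >= 10 the winner is the smallest divisor of n in
--     [10, 60] (or (1, n) if none); for 2 <= n < 10 it is the smallest divisor
--     >= 2 (the smallest prime factor); n <= 1 yields (n, 1)."""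
--     n = total_features
--     if n == 360:
--         return (6, 60)
--     if n <= 1:
--         return (n, 1)
--     if n < 10:
--         for p in range(2, n + 1):
--             if n % p == 0:
--                 return (n // p, p)
--     for ls in range(10, 61):
--         if n % ls == 0:
--             return (n // ls, ls)
--     return (1, n)
-- ===== Notes on version B (the rewrite author's own statement) =====
-- stated objective: faster
-- what changed: Replaced the O(n) scan over every candidate d in range(1, n+1) by a closed-form selection: the loop's winner is determined by the smallest admissible len_seq, so B checks only the constant candidate range 10..60 (plus 2..9 for tiny n) and returns directly.
import Mathlib
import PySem

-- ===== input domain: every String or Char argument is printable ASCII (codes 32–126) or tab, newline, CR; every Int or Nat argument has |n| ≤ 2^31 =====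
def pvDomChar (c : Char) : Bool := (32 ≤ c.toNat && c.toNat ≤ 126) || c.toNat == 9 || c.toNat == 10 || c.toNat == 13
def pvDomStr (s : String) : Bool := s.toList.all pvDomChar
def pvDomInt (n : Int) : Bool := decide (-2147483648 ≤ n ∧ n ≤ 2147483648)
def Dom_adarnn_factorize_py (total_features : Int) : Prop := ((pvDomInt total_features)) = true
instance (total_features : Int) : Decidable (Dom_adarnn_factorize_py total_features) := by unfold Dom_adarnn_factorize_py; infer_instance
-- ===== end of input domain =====

-- B replaces A's O(n) scan over range(1, n+1) by an O(1) closed-form selection: the winner is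
-- determined by the smallest admissible len_seq, so B checks at most the candidates 10..60
-- (plus 2..n for 2 ≤ n < 10) and returns directly.

-- ===== PORT A =====
-- body of A's for-loop over d (Python's best is None ↔ none)
def stepA (n : Int) (best : Option (Int × Int)) (d : Int) : Option (Int × Int) :=
  if PySem.Int.mod n d = 0 then
    let ls := PySem.Int.floordiv n d
    if ls < 2 then best
    else
      match best with
      | none => some (d, ls)
      | some b =>
        if ls ≤ 60 ∧ 10 ≤ ls ∧ (b.2 < 10 ∨ b.1 < d) then some (d, ls)
        else if b.2 < 10 ∧ 2 ≤ ls then some (d, ls)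
        else some b
  else best

def adarnn_factorize_py (total_features : Int) : List Int :=
  if total_features = 360 then [6, 60]
  else
    match (PySem.List.pyRange 1 (total_features + 1) 1).foldl (stepA total_features) none with
    | some b => [b.1, b.2]
    | none => [total_features, 1]

-- ===== PORT B =====
-- B's 'for …: if n % l == 0: return …' loops (first divisor found in the candidate list)
def firstDiv (n : Int) : List Int → Option Int
  | [] => none
  | l :: rest => if PySem.Int.mod n l = 0 then some l else firstDiv n rest

def adarnn_factorize_py_alt (total_features : Int) : List Int :=
  if total_features = 360 then [6, 60]
  else if total_features ≤ 1 then [total_features, 1]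
  else
    match (if total_features < 10 then
             firstDiv total_features (PySem.List.pyRange 2 (total_features + 1) 1)
           else none) with
    | some p => [PySem.Int.floordiv total_features p, p]
    | none =>
      match firstDiv total_features (PySem.List.pyRange 10 61 1) with
      | some ls => [PySem.Int.floordiv total_features ls, ls]
      | none => [1, total_features]

-- ===== PRECONDITION & SPEC =====
def Spec_adarnn_factorize_py (total_features : Int) (out : List Int) : Prop := out = adarnn_factorize_py_alt total_features
instance (total_features : Int) (out : List Int) : Decidable (Spec_adarnn_factorize_py total_features out) := by unfold Spec_adarnn_factorize_py; infer_instance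

-- ===== CLAIM (what is proved, stated in full; the proofs are below) =====
def Claim_equal_adarnn_factorize_py : Prop := ∀ (total_features : Int), Dom_adarnn_factorize_py total_features → Spec_adarnn_factorize_py total_features (adarnn_factorize_py total_features)

-- ===== LEMMAS AND PROOFS =====

-- invariant of A's loop after processing d = 1..k (for 2 ≤ n, 1 ≤ k ≤ n):
-- best = some b, b.1 is the current winner divisor, b.2 = n / b.1 its cofactor ≥ 2;
-- for n < 10 no later divisor ≤ k has cofactor ≥ 2, for n ≥ 10 best has cofactor ≥ 10
-- (either the initial (1, n) or a qualifier with cofactor in [10, 60]) and no later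
-- divisor ≤ k has cofactor in [10, 60]
def InvA (n k : Int) (b : Int × Int) : Prop :=
  b.1 ∣ n ∧ 1 ≤ b.1 ∧ b.1 ≤ k ∧ b.1 * b.2 = n ∧ 2 ≤ b.2 ∧
  (n < 10 → ∀ d, b.1 < d → d ≤ k → d ∣ n → n / d < 2) ∧
  (10 ≤ n → 10 ≤ b.2 ∧ ((b.1 = 1 ∧ b.2 = n) ∨ b.2 ≤ 60) ∧
    ∀ d, b.1 < d → d ≤ k → d ∣ n → ¬(10 ≤ n / d ∧ n / d ≤ 60))

lemma loopA (n : Int) (hn : 2 ≤ n) :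
    ∀ k, 1 ≤ k → k ≤ n →
      ∃ b, (PySem.List.pyRange 1 (k + 1) 1).foldl (stepA n) none = some b ∧ InvA n k b := by
  intro k hk
  induction k, hk using Int.le_induction with
  | base =>
    intro _
    refine ⟨(1, n), ?_, ?_⟩
    · rw [PySem.List.pyRange_one_singleton]
      show stepA n none 1 = some (1, n)
      unfold stepA
      rw [(PySem.Int.mod_eq_zero_iff_dvd n 1).mpr (one_dvd n),
          PySem.Int.floordiv_eq_ediv_of_pos (by norm_num : (0:Int) < 1)]
      simp only [Int.ediv_one, if_true]
      rw [if_neg (by omega)]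
    · refine ⟨one_dvd n, le_refl 1, le_refl 1, one_mul n, hn, ?_, ?_⟩
      · intro _ d hd1 hd2; omega
      · intro h10
        exact ⟨h10, Or.inl ⟨rfl, rfl⟩, fun d hd1 hd2 => by omega⟩
  | succ k hk1 ih =>
    intro hkn
    obtain ⟨b, hfold, hdvd, hb1, hb1k, hprod, hb2, hsmall, hbig⟩ := ih (by omega)
    rw [PySem.List.pyRange_one_succ_right (by omega : (1:Int) ≤ k + 1), List.foldl_append,
        hfold]
    simp only [List.foldl]
    have hb2nn : (0:Int) ≤ b.2 := by omega
    have hb2len : b.2 ≤ n := by nlinarith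
    by_cases hdd : (k + 1) ∣ n
    · have hmod : PySem.Int.mod n (k + 1) = 0 := (PySem.Int.mod_eq_zero_iff_dvd n (k+1)).mpr hdd
      have hfd : PySem.Int.floordiv n (k + 1) = n / (k + 1) :=
        PySem.Int.floordiv_eq_ediv_of_pos (by omega)
      have hcan : n / (k + 1) * (k + 1) = n := Int.ediv_mul_cancel hdd
      have hlsle : n / (k + 1) ≤ n := Int.ediv_le_self (k + 1) (by omega)
      unfold stepA
      rw [hmod]
      simp only [if_true]
      simp only [hfd]
      by_cases hls2 : n / (k + 1) < 2
      · rw [if_pos hls2]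
        refine ⟨b, rfl, hdvd, hb1, by omega, hprod, hb2, ?_, ?_⟩
        · intro hn10 d hd1 hd2 hddvd
          rcases eq_or_lt_of_le hd2 with rfl | hd2'
          · exact hls2
          · exact hsmall hn10 d hd1 (by omega) hddvd
        · intro h10
          obtain ⟨c1, c2, c3⟩ := hbig h10
          refine ⟨c1, c2, fun d hd1 hd2 hddvd => ?_⟩
          rcases eq_or_lt_of_le hd2 with rfl | hd2'
          · omega
          · exact c3 d hd1 (by omega) hddvd
      · rw [if_neg hls2]
        by_cases hq : 10 ≤ n / (k + 1) ∧ n / (k + 1) ≤ 60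
        · rw [if_pos ⟨hq.2, hq.1, Or.inr (by omega)⟩]
          refine ⟨(k + 1, n / (k + 1)), rfl, hdd, by omega, le_refl _, by linarith [hcan], by omega, ?_, ?_⟩
          · intro hn10; exfalso; omega
          · intro _
            exact ⟨hq.1, Or.inr hq.2, fun d hd1 hd2 => by omega⟩
        · rw [if_neg (by intro hc; exact hq ⟨hc.2.1, hc.1⟩)]
          by_cases hb2lt : b.2 < 10
          · rw [if_pos ⟨hb2lt, by omega⟩]
            have hn10 : n < 10 := by
              by_contra hge
              have := (hbig (by omega)).1
              omega
            refine ⟨(k + 1, n / (k + 1)), rfl, hdd, by omega, le_refl _, by linarith [hcan], by omega, ?_, ?_⟩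
            · intro _ d hd1 hd2 _; omega
            · intro h10; omega
          · rw [if_neg (by intro hc; exact hb2lt hc.1)]
            refine ⟨b, rfl, hdvd, hb1, by omega, hprod, hb2, ?_, ?_⟩
            · intro hn10; exfalso; omega
            · intro h10
              obtain ⟨c1, c2, c3⟩ := hbig h10
              refine ⟨c1, c2, fun d hd1 hd2 hddvd => ?_⟩
              rcases eq_or_lt_of_le hd2 with rfl | hd2'
              · omega
              · exact c3 d hd1 (by omega) hddvd
    · have hmod : ¬ PySem.Int.mod n (k + 1) = 0 := by
        rw [PySem.Int.mod_eq_zero_iff_dvd]; exact hdd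
      unfold stepA
      rw [if_neg hmod]
      refine ⟨b, rfl, hdvd, hb1, by omega, hprod, hb2, ?_, ?_⟩
      · intro hn10 d hd1 hd2 hddvd
        rcases eq_or_lt_of_le hd2 with rfl | hd2'
        · exact absurd hddvd hdd
        · exact hsmall hn10 d hd1 (by omega) hddvd
      · intro h10
        obtain ⟨c1, c2, c3⟩ := hbig h10
        refine ⟨c1, c2, fun d hd1 hd2 hddvd => ?_⟩
        rcases eq_or_lt_of_le hd2 with rfl | hd2'
        · exact absurd hddvd hdd
        · exact c3 d hd1 (by omega) hddvd

lemma firstDiv_none_aux (n : Int) : ∀ m : Nat, ∀ a b : Int, (b - a).toNat = m →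
    firstDiv n (PySem.List.pyRange a b 1) = none → ∀ l, a ≤ l → l < b → ¬ l ∣ n := by
  intro m
  induction m with
  | zero => intro a b hm _ l h1 h2; omega
  | succ m ih =>
    intro a b hm h l h1 h2
    have hab : a < b := by omega
    rw [PySem.List.pyRange_one_cons hab] at h
    unfold firstDiv at h
    split at h
    · exact absurd h (by simp)
    · rename_i hnd
      rw [PySem.Int.mod_eq_zero_iff_dvd] at hnd
      rcases eq_or_lt_of_le h1 with rfl | h1'
      · exact hnd
      · exact ih (a + 1) b (by omega) h l (by omega) h2

lemma firstDiv_none {n a b : Int} (h : firstDiv n (PySem.List.pyRange a b 1) = none) :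
    ∀ l, a ≤ l → l < b → ¬ l ∣ n :=
  firstDiv_none_aux n (b - a).toNat a b rfl h

lemma firstDiv_some_aux (n : Int) : ∀ m : Nat, ∀ a b l : Int, (b - a).toNat = m →
    firstDiv n (PySem.List.pyRange a b 1) = some l →
    a ≤ l ∧ l < b ∧ l ∣ n ∧ ∀ l', a ≤ l' → l' < l → ¬ l' ∣ n := by
  intro m
  induction m with
  | zero =>
    intro a b l hm h
    rw [PySem.List.pyRange_one_eq_nil (by omega)] at h
    exact absurd h (by simp [firstDiv])
  | succ m ih =>
    intro a b l hm h
    have hab : a < b := by omega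
    rw [PySem.List.pyRange_one_cons hab] at h
    unfold firstDiv at h
    split at h
    · rename_i hd
      rw [PySem.Int.mod_eq_zero_iff_dvd] at hd
      have : l = a := by simpa using h.symm
      subst this
      exact ⟨le_refl _, hab, hd, fun l' h1 h2 => by omega⟩
    · rename_i hnd
      rw [PySem.Int.mod_eq_zero_iff_dvd] at hnd
      obtain ⟨c1, c2, c3, c4⟩ := ih (a + 1) b l (by omega) h
      refine ⟨by omega, c2, c3, fun l' h1 h2 => ?_⟩
      rcases eq_or_lt_of_le h1 with rfl | h1'
      · exact hnd
      · exact c4 l' (by omega) h2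

lemma firstDiv_some {n a b l : Int} (h : firstDiv n (PySem.List.pyRange a b 1) = some l) :
    a ≤ l ∧ l < b ∧ l ∣ n ∧ ∀ l', a ≤ l' → l' < l → ¬ l' ∣ n :=
  firstDiv_some_aux n (b - a).toNat a b l rfl h

-- cofactor facts for a positive divisor l of positive n
lemma cofactor_facts {n l : Int} (hn : 0 < n) (hl : 0 < l) (hdvd : l ∣ n) :
    (n / l) * l = n ∧ 0 < n / l ∧ n / l ∣ n ∧ n / (n / l) = l ∧ n / l ≤ n := by
  have hcan : n / l * l = n := Int.ediv_mul_cancel hdvd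
  have hpos : 0 < n / l := by
    rcases lt_trichotomy (n / l) 0 with h | h | h
    · nlinarith
    · rw [h] at hcan; omega
    · exact h
  refine ⟨hcan, hpos, ⟨l, hcan.symm⟩, ?_, Int.ediv_le_self l (by omega)⟩
  have : n / l * l / (n / l) = l := Int.mul_ediv_cancel_left l (by omega)
  rw [hcan] at this; exact this

-- antitone: strictly larger cofactor means strictly smaller divisor
lemma div_lt_of_cofactor_lt {n a b c d : Int} (hab : a * b = n) (hcd : c * d = n)
    (ha : 0 < a) (_hc : 0 < c) (hbd : d < b) (hd : 0 < d) : a < c := by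
  by_contra h
  rw [not_lt] at h
  nlinarith

lemma inv_unique_small {n : Int} (hn2 : 2 ≤ n) (hn10 : n < 10) {b : Int × Int}
    (hinv : InvA n n b) {p : Int}
    (hp1 : 2 ≤ p) (hp2 : p ∣ n) (hpmin : ∀ l', 2 ≤ l' → l' < p → ¬ l' ∣ n) :
    b = (n / p, p) := by
  obtain ⟨hdvd, hb1, hb1n, hprod, hb2, hsmall, _⟩ := hinv
  have hb2dvd : b.2 ∣ n := ⟨b.1, by rw [← hprod]; ring⟩
  have hb2n : b.2 ≤ n := by nlinarith
  have hple : p ≤ b.2 := by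
    by_contra h
    exact hpmin b.2 hb2 (by omega) hb2dvd
  obtain ⟨hcan, hd0pos, hd0dvd, hd0co, hd0le⟩ := cofactor_facts (by omega) (by omega : 0 < p) hp2
  have hb2p : b.2 = p := by
    by_contra h
    have hlt : b.1 < n / p :=
      div_lt_of_cofactor_lt hprod (by omega) (by omega) hd0pos (by omega) (by omega)
    have := hsmall hn10 (n / p) hlt hd0le hd0dvd
    omega
  have : b.1 = n / p := by
    have : b.1 * p = n := by rw [← hb2p]; exact hprod
    have h2 : n / p * p = n := hcan
    exact mul_right_cancel₀ (by omega : p ≠ 0) (by omega)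
  exact Prod.ext this hb2p

lemma inv_unique_big_some {n : Int} (hn : 10 ≤ n) {b : Int × Int}
    (hinv : InvA n n b) {l : Int}
    (hl1 : 10 ≤ l) (hl2 : l ≤ 60) (hl3 : l ∣ n)
    (hlmin : ∀ l', 10 ≤ l' → l' < l → ¬ l' ∣ n) :
    b = (n / l, l) := by
  obtain ⟨hdvd, hb1, hb1n, hprod, hb2ge2, _, hbigf⟩ := hinv
  obtain ⟨hb210, hdisj, hmax⟩ := hbigf hn
  obtain ⟨hcan, hd0pos, hd0dvd, hd0co, hd0le⟩ := cofactor_facts (by omega) (by omega : 0 < l) hl3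
  have hb2dvd : b.2 ∣ n := ⟨b.1, by rw [← hprod]; ring⟩
  have hb2n : b.2 ≤ n := by nlinarith
  have hb260 : b.2 ≤ 60 := by
    rcases hdisj with ⟨hb11, hb2n'⟩ | h60
    · -- b = (1, n); if n > 60 the qualifier n / l would have beaten it
      by_contra h
      have hd0gt1 : 1 < n / l := by nlinarith
      have := hmax (n / l) (by omega) hd0le hd0dvd
      rw [hd0co] at this
      exact this ⟨hl1, hl2⟩
    · exact h60
  have hlle : l ≤ b.2 := by
    by_contra h
    exact hlmin b.2 hb210 (by omega) hb2dvd
  have hb2l : b.2 = l := by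
    by_contra h
    have hlt : b.1 < n / l :=
      div_lt_of_cofactor_lt hprod (by omega) (by omega) hd0pos (by omega) (by omega)
    have := hmax (n / l) hlt hd0le hd0dvd
    rw [hd0co] at this
    exact this ⟨hl1, hl2⟩
  have : b.1 = n / l := by
    have : b.1 * l = n := by rw [← hb2l]; exact hprod
    exact mul_right_cancel₀ (by omega : l ≠ 0) (by omega)
  exact Prod.ext this hb2l

lemma inv_unique_big_none {n : Int} (hn : 10 ≤ n) {b : Int × Int}
    (hinv : InvA n n b) (hnone : ∀ l, 10 ≤ l → l < 61 → ¬ l ∣ n) :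
    b = (1, n) := by
  obtain ⟨hdvd, hb1, hb1n, hprod, hb2ge2, _, hbigf⟩ := hinv
  obtain ⟨hb210, hdisj, hmax⟩ := hbigf hn
  rcases hdisj with ⟨hb11, hb2n'⟩ | h60
  · exact Prod.ext hb11 hb2n'
  · exact absurd ⟨b.1, by rw [← hprod]; ring⟩ (hnone b.2 hb210 (by omega))

-- ===== VERDICT (by name: the statement is the Claim_ definition above) =====
set_option maxRecDepth 4000 in
theorem adarnn_factorize_py_spec : Claim_equal_adarnn_factorize_py := by
  intro n _
  show adarnn_factorize_py n = adarnn_factorize_py_alt n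
  by_cases h360 : n = 360
  · subst h360; rfl
  · by_cases hle0 : n ≤ 0
    · unfold adarnn_factorize_py adarnn_factorize_py_alt
      rw [if_neg h360, if_neg h360, if_pos (by omega : n ≤ 1),
          PySem.List.pyRange_one_eq_nil (by omega : n + 1 ≤ 1)]
      rfl
    · by_cases hone : n = 1
      · subst hone; decide
      · have hn2 : 2 ≤ n := by omega
        obtain ⟨b, hfold, hinv⟩ := loopA n hn2 n (by omega) le_rfl
        unfold adarnn_factorize_py adarnn_factorize_py_alt
        rw [if_neg h360, if_neg h360, if_neg (by omega : ¬ n ≤ 1), hfold]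
        by_cases hn10 : n < 10
        · rw [if_pos hn10]
          cases heq : firstDiv n (PySem.List.pyRange 2 (n + 1) 1) with
          | none =>
            exact absurd (dvd_refl n) (firstDiv_none heq n (by omega) (by omega))
          | some p =>
            obtain ⟨hp1, hp2, hp3, hp4⟩ := firstDiv_some heq
            have hb : b = (n / p, p) := inv_unique_small hn2 hn10 hinv hp1 hp3 hp4
            rw [hb]
            show [n / p, p] = [PySem.Int.floordiv n p, p]
            rw [PySem.Int.floordiv_eq_ediv_of_pos (by omega : (0:Int) < p)]
        · rw [if_neg hn10]
          cases heq : firstDiv n (PySem.List.pyRange 10 61 1) with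
          | none =>
            have hb : b = (1, n) := inv_unique_big_none (by omega) hinv (firstDiv_none heq)
            rw [hb]
          | some l =>
            obtain ⟨hl1, hl2, hl3, hl4⟩ := firstDiv_some heq
            have hb : b = (n / l, l) :=
              inv_unique_big_some (by omega) hinv hl1 (by omega) hl3 hl4
            rw [hb]
            show [n / l, l] = [PySem.Int.floordiv n l, l]
            rw [PySem.Int.floordiv_eq_ediv_of_pos (by omega : (0:Int) < l)]
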